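-- pv_equiv track=rewrite | github.com/gems-uff/combination_conflicts_analysis | extract_data.py | get_before_context
-- ===== SOURCE A (Python) =====
-- def get_before_context(chunk_code):
--     lines = chunk_code.split("\n")
--     before_context = ""
--     start = True
--     for line in lines:
--         if("<<<<<<<" in line):
--             start = False
--             continue
--         if(start == True):
--             before_context+=line+"\n"
--     return before_context
-- ===== SOURCE B (Python) =====
-- def get_before_context(chunk_code):
--     pos = chunk_code.find("<<<<<<<")
--     if pos == -1:
--         return chunk_code + "\n"
--     line_start = chunk_code.rfind("\n", 0, pos) + 1
--     return chunk_code[:line_start]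
-- ===== Notes on version B (the rewrite author's own statement) =====
-- stated objective: alternative
-- what changed: A splits the string into lines and scans them all with a start-flag accumulator; B never builds the line list: it locates the marker with str.find, finds the start of its line with str.rfind, and returns one slice (appending ' ' only when no marker exists).
import Mathlib
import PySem

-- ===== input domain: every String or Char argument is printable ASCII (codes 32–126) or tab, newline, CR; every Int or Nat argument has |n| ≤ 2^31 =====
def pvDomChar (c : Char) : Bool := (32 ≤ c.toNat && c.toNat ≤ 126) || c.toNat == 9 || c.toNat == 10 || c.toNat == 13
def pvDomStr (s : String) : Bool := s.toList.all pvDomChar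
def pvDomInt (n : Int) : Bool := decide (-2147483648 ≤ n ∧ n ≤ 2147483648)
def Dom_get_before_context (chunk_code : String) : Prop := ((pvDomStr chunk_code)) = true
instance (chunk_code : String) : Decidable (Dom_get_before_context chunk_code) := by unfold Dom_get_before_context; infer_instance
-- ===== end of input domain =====

-- B replaces A's split-into-lines / flag-loop / accumulate with direct string indexing
-- (find the marker, cut at the start of its line); objective: alternative, same O(n) cost.

-- ===== PORT A =====
def get_before_context (chunk_code : String) : String :=
  let lines := (PySem.Str.split? chunk_code "\n").getD []
  (lines.foldl (fun st line =>
      if PySem.Str.isIn "<<<<<<<" line then (st.1, false)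
      else if st.2 then (st.1 ++ line ++ "\n", st.2) else st)
    (("", true) : String × Bool)).1

-- ===== PORT B =====
def get_before_context_alt (chunk_code : String) : String :=
  let pos := PySem.Str.find chunk_code "<<<<<<<"
  if pos = -1 then chunk_code ++ "\n"
  else
    let line_start := PySem.Str.rfindFrom chunk_code "\n" 0 (some pos) + 1
    PySem.Str.slice chunk_code none (some line_start)

-- ===== PRECONDITION & SPEC =====
def Spec_get_before_context (chunk_code : String) (out : String) : Prop := out = get_before_context_alt chunk_code
instance (chunk_code : String) (out : String) : Decidable (Spec_get_before_context chunk_code out) := by unfold Spec_get_before_context; infer_instance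

-- ===== CLAIM (what is proved, stated in full; the proofs are below) =====
def Claim_equal_get_before_context : Prop := ∀ (chunk_code : String), Dom_get_before_context chunk_code → Spec_get_before_context chunk_code (get_before_context chunk_code)

-- ===== LEMMAS AND PROOFS =====

-- the conflict marker, as a char list
def pvMrk : List Char := ['<','<','<','<','<','<','<']

-- simple structural recursion computing Python's split("\n")
def spN : List Char → List (List Char)
  | [] => [[]]
  | c :: t =>
    if c = '\n' then [] :: spN t
    else match spN t with
      | [] => [[c]]
      | h :: r => (c :: h) :: r

-- join with '\n' between pieces (inverse of spN)
def joinNL : List (List Char) → List Char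
  | [] => []
  | [l] => l
  | l :: r => l ++ '\n' :: joinNL r

-- chars-level version of A's loop body
def stepA (st : List Char × Bool) (line : List Char) : List Char × Bool :=
  if PySem.Chars.isIn pvMrk line then (st.1, false)
  else if st.2 then (st.1 ++ line ++ ['\n'], st.2) else st

-- chars-level version of B's value, with rfindFrom already reduced to rfind on a prefix
def bChars (cs : List Char) : List Char :=
  let p := PySem.Chars.find cs pvMrk
  if p = -1 then cs ++ ['\n']
  else cs.take (PySem.Chars.rfind (cs.take p.toNat) ['\n'] + 1).toNat

-- prefix helper used by the splitOn characterisation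
def mh (f : List Char → List Char) : List (List Char) → List (List Char)
  | [] => []
  | h :: t => f h :: t

lemma spN_ne_nil (cs : List Char) : spN cs ≠ [] := by
  induction cs with
  | nil => simp [spN]
  | cons c t ih =>
    simp only [spN]; split
    · simp
    · cases h : spN t with
      | nil => simp
      | cons a b => simp

lemma go_spec : ∀ fuel (l cur : List Char) (acc : List (List Char)), l.length ≤ fuel →
    PySem.Chars.splitOn.go ['\n'] fuel l cur acc = acc.reverse ++ mh (cur.reverse ++ ·) (spN l) := by
  intro fuel
  induction fuel with
  | zero =>
    intro l cur acc h
    interval_cases hl : l.length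
    have : l = [] := List.eq_nil_of_length_eq_zero hl
    subst this
    rw [PySem.Chars.splitOn.go]
    simp [spN, mh]
  | succ fuel ih =>
    intro l cur acc h
    cases l with
    | nil =>
      rw [PySem.Chars.splitOn.go]
      simp [spN, mh]
      omega
    | cons c rest =>
      rw [PySem.Chars.splitOn.go]
      by_cases hc : c = '\n'
      · subst hc
        rw [if_pos (by simp [List.isPrefixOf])]
        rw [ih _ _ _ (by simpa using h)]
        simp [spN, mh]
        cases hs : spN rest with
        | nil => exact absurd hs (spN_ne_nil rest)
        | cons a b => simp
      · rw [if_neg (by simp [List.isPrefixOf]; exact fun hh => hc hh.symm)]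
        rw [ih _ _ _ (by simpa using h)]
        simp only [spN, if_neg hc]
        cases hs : spN rest with
        | nil => exact absurd hs (spN_ne_nil rest)
        | cons a b => simp [mh]

lemma splitOn_eq_spN (cs : List Char) : PySem.Chars.splitOn cs ['\n'] = spN cs := by
  rw [PySem.Chars.splitOn, go_spec _ _ _ _ (by omega)]
  cases hs : spN cs with
  | nil => exact absurd hs (spN_ne_nil cs)
  | cons a b => simp [mh]

lemma joinNL_cons_cons (l a : List Char) (r : List (List Char)) :
    joinNL (l :: a :: r) = l ++ '\n' :: joinNL (a :: r) := rfl

lemma joinNL_spN (cs : List Char) : joinNL (spN cs) = cs := by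
  induction cs with
  | nil => simp [spN, joinNL]
  | cons c t ih =>
    simp only [spN]
    split
    · rename_i hc
      subst hc
      cases h : spN t with
      | nil => exact absurd h (spN_ne_nil t)
      | cons a b =>
        rw [h] at ih
        rw [joinNL_cons_cons]
        simp [ih]
    · cases h : spN t with
      | nil => exact absurd h (spN_ne_nil t)
      | cons a b =>
        rw [h] at ih
        cases b with
        | nil => simp [joinNL] at ih ⊢; exact ih
        | cons x y =>
          rw [joinNL_cons_cons] at ih ⊢
          simpa using ih

lemma spN_no_nl (cs : List Char) : ∀ l ∈ spN cs, '\n' ∉ l := by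
  induction cs with
  | nil => simp [spN]
  | cons c t ih =>
    simp only [spN]
    split
    · intro l hl
      simp at hl
      rcases hl with h | h
      · simp [h]
      · exact ih l h
    · rename_i hc
      cases h : spN t with
      | nil => exact absurd h (spN_ne_nil t)
      | cons a b =>
        intro l hl
        simp at hl
        rcases hl with h' | h'
        · subst h'
          intro hmem
          simp at hmem
          rcases hmem with h'' | h''
          · exact hc h''.symm
          · exact ih a (by simp [h]) h''
        · exact ih l (by simp [h, h'])

lemma prefNl (t : List Char) : ['\n'].isPrefixOf t = true ↔ t[0]? = some '\n' := by
  cases t with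
  | nil => decide
  | cons a b =>
    rw [List.isPrefixOf_iff_prefix]
    simp [List.cons_prefix_cons, eq_comm]

lemma rgo_step (s : List Char) (j : Nat) :
    PySem.Chars.rfind.go s ['\n'] (j+1) =
      if ['\n'].isPrefixOf (List.drop (j+1) s) = true then ((j+1 : Nat) : Int)
      else PySem.Chars.rfind.go s ['\n'] j := by
  rw [PySem.Chars.rfind.go]

lemma rgo_zero (s : List Char) :
    PySem.Chars.rfind.go s ['\n'] 0 = if ['\n'].isPrefixOf s = true then 0 else -1 := by
  rw [PySem.Chars.rfind.go]

lemma rgo_neg (s : List Char) (k : Nat) (h : ∀ j, j ≤ k → s[j]? ≠ some '\n') :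
    PySem.Chars.rfind.go s ['\n'] k = -1 := by
  induction k with
  | zero =>
    rw [rgo_zero]
    rw [if_neg]
    intro hp
    exact h 0 le_rfl ((prefNl s).1 hp)
  | succ k ih =>
    rw [rgo_step]
    rw [if_neg]
    · exact ih (fun j hj => h j (by omega))
    · intro hp
      rw [prefNl] at hp
      rw [List.getElem?_drop] at hp
      exact h (k+1) le_rfl (by simpa using hp)

lemma rgo_pos (s : List Char) (j : Nat) (hj : s[j]? = some '\n') :
    ∀ k, j ≤ k → (∀ i, j < i → i ≤ k → s[i]? ≠ some '\n') →
    PySem.Chars.rfind.go s ['\n'] k = (j : Int) := by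
  intro k
  induction k with
  | zero =>
    intro hjk _
    have : j = 0 := by omega
    subst this
    rw [rgo_zero, if_pos ((prefNl s).2 (by simpa using hj))]
    simp
  | succ k ih =>
    intro hjk hmax
    rw [rgo_step]
    by_cases hej : j = k + 1
    · subst hej
      rw [if_pos]
      rw [prefNl, List.getElem?_drop]
      simpa using hj
    · rw [if_neg]
      · exact ih (by omega) (fun i h1 h2 => hmax i h1 (by omega))
      · intro hp
        rw [prefNl, List.getElem?_drop] at hp
        exact hmax (k+1) (by omega) le_rfl (by simpa using hp)

lemma rgo_ne_neg (s : List Char) (j : Nat) (hj : s[j]? = some '\n') :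
    ∀ k, j ≤ k → PySem.Chars.rfind.go s ['\n'] k ≠ -1 := by
  intro k
  induction k with
  | zero =>
    intro hjk
    have : j = 0 := by omega
    subst this
    rw [rgo_zero, if_pos ((prefNl s).2 (by simpa using hj))]
    decide
  | succ k ih =>
    intro hjk
    rw [rgo_step]
    split
    · omega
    · rename_i hp
      by_cases hej : j = k + 1
      · subst hej
        rw [prefNl, List.getElem?_drop] at hp
        simp at hp
        exact absurd hj hp
      · exact ih (by omega)

lemma rgo_spec (s : List Char) (k : Nat) (h : PySem.Chars.rfind.go s ['\n'] k ≠ -1) :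
    ∃ j : Nat, PySem.Chars.rfind.go s ['\n'] k = (j : Int) ∧ j ≤ k ∧ s[j]? = some '\n' ∧
      ∀ i, j < i → i ≤ k → s[i]? ≠ some '\n' := by
  induction k with
  | zero =>
    rw [rgo_zero] at h ⊢
    by_cases hp : ['\n'].isPrefixOf s = true
    · rw [if_pos hp]
      exact ⟨0, by simp, le_rfl, (prefNl s).1 hp, by omega⟩
    · rw [if_neg hp] at h
      simp at h
  | succ k ih =>
    rw [rgo_step] at h ⊢
    by_cases hp : ['\n'].isPrefixOf (List.drop (k+1) s) = true
    · rw [if_pos hp]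
      rw [prefNl, List.getElem?_drop] at hp
      exact ⟨k+1, by simp, le_rfl, by simpa using hp, by omega⟩
    · rw [if_neg hp] at h ⊢
      obtain ⟨j, h1, h2, h3, h4⟩ := ih h
      refine ⟨j, h1, by omega, h3, ?_⟩
      intro i hi1 hi2
      by_cases he : i = k + 1
      · subst he
        rw [prefNl, List.getElem?_drop] at hp
        intro hc
        exact hp (by simpa using hc)
      · exact h4 i hi1 (by omega)

lemma rfind_no_nl (s : List Char) (h : '\n' ∉ s) : PySem.Chars.rfind s ['\n'] = -1 := by
  rw [PySem.Chars.rfind]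
  apply rgo_neg
  intro j _ hc
  exact h (List.mem_of_getElem? hc)

lemma idx_mid (a b : List Char) : (a ++ '\n' :: b)[a.length]? = some '\n' := by
  rw [List.getElem?_append_right le_rfl]
  simp

lemma idx_right (a b : List Char) (i : Nat) (h : a.length < i) :
    (a ++ '\n' :: b)[i]? = b[i - a.length - 1]? := by
  rw [List.getElem?_append_right (by omega)]
  rw [List.getElem?_cons]
  rw [if_neg (by omega)]

lemma rfind_append (a b : List Char) :
    PySem.Chars.rfind (a ++ '\n' :: b) ['\n'] = a.length + 1 + PySem.Chars.rfind b ['\n'] := by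
  by_cases hb : '\n' ∈ b
  · obtain ⟨j0, hj0lt, hj0⟩ := List.getElem_of_mem hb
    have hne : PySem.Chars.rfind b ['\n'] ≠ -1 := by
      rw [PySem.Chars.rfind]
      exact rgo_ne_neg b j0 (by rw [List.getElem?_eq_getElem hj0lt, hj0]) b.length (by omega)
    simp only [PySem.Chars.rfind] at hne ⊢
    obtain ⟨j, h1, h2, h3, h4⟩ := rgo_spec b b.length hne
    rw [h1]
    have := rgo_pos (a ++ '\n' :: b) (a.length + 1 + j)
      (by
        rw [idx_right _ _ _ (by omega)]
        have he : a.length + 1 + j - a.length - 1 = j := by omega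
        rw [he]; exact h3)
      (a ++ '\n' :: b).length (by simp; omega)
      (by
        intro i hi1 hi2
        rw [idx_right _ _ _ (by omega)]
        by_cases hle : i - a.length - 1 ≤ b.length
        · exact h4 _ (by omega) hle
        · rw [List.getElem?_eq_none (by omega)]; simp)
    rw [this]
    push_cast
    ring
  · rw [rfind_no_nl b hb]
    rw [PySem.Chars.rfind]
    have := rgo_pos (a ++ '\n' :: b) a.length (idx_mid a b)
      (a ++ '\n' :: b).length (by simp)
      (by
        intro i hi1 hi2
        rw [idx_right _ _ _ hi1]
        intro hc
        exact hb (List.mem_of_getElem? hc))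
    rw [this]
    ring

lemma find_eq_of (cs m : List Char) (q : Nat) (hq : m <+: cs.drop q)
    (hmin : ∀ i : Nat, i < q → ¬ m <+: cs.drop i) : PySem.Chars.find cs m = (q : Int) := by
  have hin : PySem.Chars.isIn m cs = true := (PySem.Chars.exists_prefix_drop_iff_isIn m cs).1 ⟨q, hq⟩
  have hnn : 0 ≤ PySem.Chars.find cs m := by
    rw [PySem.Chars.find_nonneg_iff]
    exact (PySem.Chars.isIn_iff_infix m cs).1 hin
  obtain ⟨hpref, hminf⟩ := PySem.Chars.find_spec (s := cs) (sub := m) hnn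
  have h1 : ¬ (PySem.Chars.find cs m).toNat < q := fun hc => hmin _ hc hpref
  have h2 : ¬ q < (PySem.Chars.find cs m).toNat := fun hc => hminf q hc hq
  omega

lemma drop_mid (l b : List Char) (c : Char) (i : Nat) (h : l.length < i) :
    (l ++ c :: b).drop i = b.drop (i - l.length - 1) := by
  rw [List.drop_append]
  rw [List.drop_of_length_le (by omega)]
  have : i - l.length = (i - l.length - 1) + 1 := by omega
  rw [this]
  simp

lemma drop_left' (l b : List Char) (c : Char) (i : Nat) (h : i ≤ l.length) :
    (l ++ c :: b).drop i = l.drop i ++ c :: b := by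
  rw [List.drop_append, show i - l.length = 0 from by omega, List.drop_zero]

lemma no_occ (l b : List Char) (hl : ¬ pvMrk <:+: l) :
    ∀ i : Nat, i ≤ l.length → ¬ pvMrk <+: (l ++ '\n' :: b).drop i := by
  intro i hi hpref
  by_cases hfit : i + pvMrk.length ≤ l.length
  · apply hl
    have h1 : pvMrk <+: l.drop i := by
      rw [List.prefix_iff_eq_take] at hpref ⊢
      rw [drop_left' _ _ _ _ hi] at hpref
      rw [List.take_append_of_le_length (by simp; omega)] at hpref
      exact hpref
    exact h1.isInfix.trans (List.drop_suffix i l).isInfix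
  · -- the occurrence would cover the '\n' at position l.length
    obtain ⟨t, ht⟩ := hpref
    have hidx : pvMrk[l.length - i]? = some '\n' := by
      have h1 : (pvMrk ++ t)[l.length - i]? = pvMrk[l.length - i]? :=
        List.getElem?_append_left (by
          have h7 : pvMrk.length = 7 := rfl
          omega)
      rw [← h1, ht, List.getElem?_drop]
      have : i + (l.length - i) = l.length := by omega
      rw [this]
      rw [List.getElem?_append_right le_rfl]
      simp
    have : '\n' ∈ pvMrk := List.mem_of_getElem? hidx
    simp [pvMrk] at this

lemma infix_iff_exists (m s : List Char) : m <:+: s ↔ ∃ j, m <+: s.drop j := by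
  rw [← PySem.Chars.isIn_iff_infix, ← PySem.Chars.exists_prefix_drop_iff_isIn]

lemma find_cs_neg (l b : List Char) (hl : ¬ pvMrk <:+: l)
    (hb : PySem.Chars.find b pvMrk = -1) :
    PySem.Chars.find (l ++ '\n' :: b) pvMrk = -1 := by
  rw [PySem.Chars.find_eq_neg_one_iff] at hb ⊢
  intro hinf
  obtain ⟨j, hj⟩ := (infix_iff_exists _ _).1 hinf
  by_cases hle : j ≤ l.length
  · exact no_occ l b hl j hle hj
  · apply hb
    rw [infix_iff_exists]
    refine ⟨j - l.length - 1, ?_⟩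
    rw [← drop_mid l b '\n' j (by omega)]
    exact hj

lemma find_cs_pos (l b : List Char) (hl : ¬ pvMrk <:+: l) (p' : Nat)
    (hb : PySem.Chars.find b pvMrk = (p' : Int)) :
    PySem.Chars.find (l ++ '\n' :: b) pvMrk = ((l.length + 1 + p' : Nat) : Int) := by
  have hnn : 0 ≤ PySem.Chars.find b pvMrk := by rw [hb]; omega
  obtain ⟨hpref, hmin⟩ := PySem.Chars.find_spec (s := b) (sub := pvMrk) hnn
  rw [hb] at hpref hmin
  simp only [Int.toNat_natCast] at hpref hmin
  apply find_eq_of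
  · rw [drop_mid l b '\n' _ (by omega)]
    have : l.length + 1 + p' - l.length - 1 = p' := by omega
    rw [this]
    exact hpref
  · intro i hi
    by_cases hle : i ≤ l.length
    · exact no_occ l b hl i hle
    · rw [drop_mid l b '\n' _ (by omega)]
      exact hmin _ (by omega)


lemma rfind_ge (s : List Char) : -1 ≤ PySem.Chars.rfind s ['\n'] := by
  by_cases h : PySem.Chars.rfind s ['\n'] = -1
  · omega
  · rw [PySem.Chars.rfind] at h ⊢
    obtain ⟨j, h1, -⟩ := rgo_spec s s.length h
    rw [h1]; omega

lemma stepA_false (lines : List (List Char)) (b : List Char) :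
    lines.foldl stepA (b, false) = (b, false) := by
  induction lines with
  | nil => rfl
  | cons l rest ih =>
    rw [List.foldl_cons]
    have : stepA (b, false) l = (b, false) := by
      simp [stepA]
    rw [this, ih]

lemma foldA_shift (lines : List (List Char)) (b : List Char) :
    lines.foldl stepA (b, true) =
      (b ++ (lines.foldl stepA ([], true)).1, (lines.foldl stepA ([], true)).2) := by
  induction lines generalizing b with
  | nil => simp
  | cons l rest ih =>
    rw [List.foldl_cons, List.foldl_cons]
    by_cases hIn : PySem.Chars.isIn pvMrk l = true
    · rw [show stepA (b, true) l = (b, false) from by simp [stepA, hIn]]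
      rw [show stepA (([] : List Char), true) l = ([], false) from by simp [stepA, hIn]]
      rw [stepA_false, stepA_false]
      simp
    · rw [show stepA (b, true) l = (b ++ l ++ ['\n'], true) from by simp [stepA, hIn]]
      rw [show stepA (([] : List Char), true) l = (l ++ ['\n'], true) from by simp [stepA, hIn]]
      rw [ih (b ++ l ++ ['\n']), ih (l ++ ['\n'])]
      simp

lemma marker_head (l tail : List Char) (hIn : PySem.Chars.isIn pvMrk l = true)
    (hnl : '\n' ∉ l) : bChars (l ++ tail) = [] := by
  obtain ⟨u, v, huv⟩ := (PySem.Chars.isIn_iff_infix pvMrk l).1 hIn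
  have hj : pvMrk <+: l.drop u.length := by
    rw [← huv, List.append_assoc, List.drop_left]
    exact List.prefix_append pvMrk v
  have hjlen : u.length + pvMrk.length ≤ l.length := by
    rw [← huv]; simp
  have hjcs : pvMrk <+: (l ++ tail).drop u.length := by
    rw [List.drop_append]
    exact hj.trans (List.prefix_append _ _)
  have hnn : 0 ≤ PySem.Chars.find (l ++ tail) pvMrk := by
    rw [PySem.Chars.find_nonneg_iff, infix_iff_exists]
    exact ⟨u.length, hjcs⟩
  obtain ⟨hpref, hmin⟩ := PySem.Chars.find_spec (s := l ++ tail) (sub := pvMrk) hnn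
  set p := PySem.Chars.find (l ++ tail) pvMrk with hp
  have hple : p.toNat ≤ u.length := by
    by_contra hc
    exact hmin u.length (by omega) hjcs
  have htake : (l ++ tail).take p.toNat = l.take p.toNat :=
    List.take_append_of_le_length (by omega)
  simp only [bChars]
  rw [if_neg (by omega)]
  rw [htake, rfind_no_nl _ (fun hc => hnl (List.take_subset _ _ hc))]
  norm_num

lemma take_mid (l b : List Char) (c : Char) (k : Nat) :
    (l ++ c :: b).take (l.length + 1 + k) = l ++ c :: b.take k := by
  rw [List.take_append, List.take_of_length_le (by omega)]
  have : l.length + 1 + k - l.length = k + 1 := by omega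
  rw [this, List.take_succ_cons]



lemma key (lines : List (List Char)) (hne : lines ≠ []) (hnl : ∀ l ∈ lines, '\n' ∉ l) :
    (lines.foldl stepA ([], true)).1 = bChars (joinNL lines) := by
  induction lines with
  | nil => exact absurd rfl hne
  | cons l rest ih =>
    by_cases hIn : PySem.Chars.isIn pvMrk l = true
    · -- marker in the first line: both sides are []
      have hA : (List.foldl stepA ([], true) (l :: rest)).1 = [] := by
        rw [List.foldl_cons, show stepA (([] : List Char), true) l = ([], false) from by
          simp [stepA, hIn], stepA_false]
      rw [hA]
      cases rest with
      | nil =>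
        have := marker_head l [] hIn (hnl l (by simp))
        rw [List.append_nil] at this
        rw [show joinNL [l] = l from rfl, this]
      | cons r rs =>
        rw [joinNL_cons_cons]
        rw [marker_head l ('\n' :: joinNL (r :: rs)) hIn (hnl l (by simp))]
    · have hlin : PySem.Chars.isIn pvMrk l = false := by simpa using hIn
      have hninf : ¬ pvMrk <:+: l := by
        intro hc
        have h2 := (PySem.Chars.isIn_iff_infix pvMrk l).2 hc
        rw [hlin] at h2
        exact absurd h2 (by decide)
      have hA : List.foldl stepA ([], true) (l :: rest) =
          (l ++ ['\n'] ++ (rest.foldl stepA ([], true)).1, (rest.foldl stepA ([], true)).2) := by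
        rw [List.foldl_cons, show stepA (([] : List Char), true) l = (l ++ ['\n'], true) from by
          simp [stepA, hIn], foldA_shift]
      cases rest with
      | nil =>
        have hfneg : PySem.Chars.find l pvMrk = -1 := by
          rw [PySem.Chars.find_eq_neg_one_iff]
          exact hninf
        rw [hA]
        simp only [List.foldl_nil]
        rw [show joinNL [l] = l from rfl]
        simp only [bChars]
        rw [if_pos hfneg]
        simp
      | cons r rs =>
        have hrest : (r :: rs : List (List Char)) ≠ [] := by simp
        have ihv := ih hrest (fun x hx => hnl x (by simp [hx]))
        rw [hA]
        simp only
        rw [joinNL_cons_cons]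
        set cs' := joinNL (r :: rs) with hcs'
        by_cases hfb : PySem.Chars.find cs' pvMrk = -1
        · rw [ihv]
          simp only [bChars]
          rw [if_pos (find_cs_neg l cs' hninf hfb), if_pos hfb]
          simp
        · have hnn : 0 ≤ PySem.Chars.find cs' pvMrk := by
            have := PySem.Chars.neg_one_le_find cs' pvMrk
            omega
          set p' := (PySem.Chars.find cs' pvMrk).toNat with hp'
          have hb : PySem.Chars.find cs' pvMrk = (p' : Int) := by omega
          have hfcs := find_cs_pos l cs' hninf p' hb
          simp only [bChars]
          rw [hfcs]
          rw [if_neg (by omega)]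
          rw [Int.toNat_natCast, take_mid]
          rw [rfind_append]
          have hr' := rfind_ge (cs'.take p')
          set r' := PySem.Chars.rfind (cs'.take p') ['\n'] with hrr
          set k := (r' + 1).toNat with hk
          have hkk : r' + 1 = (k : Int) := by omega
          have hcast : (l.length : Int) + 1 + r' + 1 = ((l.length + 1 + k : Nat) : Int) := by
            push_cast
            omega
          rw [hcast, Int.toNat_natCast, take_mid]
          rw [ihv]
          simp only [bChars]
          rw [if_neg hfb, ← hp', ← hrr, ← hk]
          simp

lemma rfindFrom_take (cs : List Char) (p : Int) (h0 : 0 ≤ p) (hl : p ≤ cs.length) :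
    PySem.Chars.rfindFrom cs ['\n'] 0 (some p) = PySem.Chars.rfind (cs.take p.toNat) ['\n'] := by
  simp only [PySem.Chars.rfindFrom]
  have h1 : ¬ ((cs.length : Int) < p) := by omega
  have h2 : ¬ (p < 0) := by omega
  simp [h1, h2]
  intro h; omega

-- the String-level fold of port A mirrors the chars-level fold
lemma fold_bridge (L : List String) (b : String) (st : Bool) :
    (L.foldl (fun st line =>
        if PySem.Str.isIn "<<<<<<<" line then (st.1, false)
        else if st.2 then (st.1 ++ line ++ "\n", st.2) else st) ((b, st) : String × Bool)).1.toList =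
      ((L.map String.toList).foldl stepA (b.toList, st)).1 ∧
    (L.foldl (fun st line =>
        if PySem.Str.isIn "<<<<<<<" line then (st.1, false)
        else if st.2 then (st.1 ++ line ++ "\n", st.2) else st) ((b, st) : String × Bool)).2 =
      ((L.map String.toList).foldl stepA (b.toList, st)).2 := by
  induction L generalizing b st with
  | nil => exact ⟨rfl, rfl⟩
  | cons x xs ih =>
    simp only [List.foldl_cons, List.map_cons]
    by_cases hIn : PySem.Chars.isIn pvMrk x.toList = true
    · have hS : PySem.Str.isIn "<<<<<<<" x = true := by rw [PySem.Str.isIn_eq]; exact hIn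
      have h2 : stepA (b.toList, st) x.toList = (b.toList, false) := by
        simp [stepA, hIn]
      rw [if_pos hS, h2]
      exact ih b false
    · have hIn' : PySem.Chars.isIn pvMrk x.toList = false := by simpa using hIn
      have hS : PySem.Str.isIn "<<<<<<<" x = false := by
        rw [PySem.Str.isIn_eq]
        exact hIn'
      have hSne : ¬ PySem.Str.isIn "<<<<<<<" x = true := by rw [hS]; decide
      cases st with
      | true =>
        have h2 : stepA (b.toList, true) x.toList = (b.toList ++ x.toList ++ ['\n'], true) := by
          simp [stepA, hIn']
        rw [if_neg hSne, if_pos rfl, h2]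
        have := ih (b ++ x ++ "\n") true
        rwa [show (b ++ x ++ "\n").toList = b.toList ++ x.toList ++ ['\n'] from by
          rw [String.toList_append, String.toList_append]; rfl] at this
      | false =>
        have h2 : stepA (b.toList, false) x.toList = (b.toList, false) := by
          simp [stepA, hIn']
        rw [if_neg hSne, if_neg (by simp), h2]
        exact ih b false


theorem final (chunk : String) :
    get_before_context chunk = get_before_context_alt chunk := by
  apply String.ext
  -- reduce A's value to bChars chunk.toList
  have hsplit : Option.map (List.map String.toList) (PySem.Str.split? chunk "\n") =
      some (PySem.Chars.splitOn chunk.toList ['\n']) := by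
    rw [PySem.Str.split?_map]
    rw [show ("\n" : String).toList = ['\n'] from rfl]
    rw [PySem.Chars.split?]
    rw [if_neg (by simp)]
  obtain ⟨L, hL, hLmap⟩ : ∃ L, PySem.Str.split? chunk "\n" = some L ∧
      L.map String.toList = PySem.Chars.splitOn chunk.toList ['\n'] := by
    cases h : PySem.Str.split? chunk "\n" with
    | none => rw [h] at hsplit; simp at hsplit
    | some L =>
      rw [h] at hsplit
      simp only [Option.map_some, Option.some.injEq] at hsplit
      exact ⟨L, rfl, hsplit⟩
  have hA : (get_before_context chunk).toList = bChars chunk.toList := by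
    unfold get_before_context
    rw [hL]
    simp only [Option.getD_some]
    have hb := (fold_bridge L "" true).1
    rw [show ("" : String).toList = [] from rfl] at hb
    rw [hb, hLmap, splitOn_eq_spN]
    rw [key (spN chunk.toList) (spN_ne_nil chunk.toList) (spN_no_nl chunk.toList)]
    rw [joinNL_spN]
  rw [hA]
  -- reduce B's value to bChars chunk.toList
  unfold get_before_context_alt
  simp only
  have hfind : PySem.Str.find chunk "<<<<<<<" = PySem.Chars.find chunk.toList pvMrk := by
    rw [PySem.Str.find_eq]
    rfl
  by_cases hpos : PySem.Str.find chunk "<<<<<<<" = -1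
  · rw [if_pos hpos]
    rw [String.toList_append]
    simp only [bChars]
    rw [if_pos (by rw [← hfind]; exact hpos)]
    rfl
  · rw [if_neg hpos]
    have hge : 0 ≤ PySem.Str.find chunk "<<<<<<<" := by
      rw [hfind] at hpos ⊢
      have := PySem.Chars.neg_one_le_find chunk.toList pvMrk
      omega
    have hle : PySem.Str.find chunk "<<<<<<<" ≤ chunk.toList.length := by
      rw [hfind]
      exact PySem.Chars.find_le_length chunk.toList pvMrk
    rw [PySem.Str.rfindFrom_eq]
    rw [show ("\n" : String).toList = ['\n'] from rfl]
    rw [rfindFrom_take chunk.toList _ hge hle]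
    have hr := rfind_ge (chunk.toList.take (PySem.Str.find chunk "<<<<<<<").toNat)
    rw [PySem.Str.toList_slice]
    rw [PySem.Chars.slice_eq_listSlice]
    rw [PySem.List.slice_to _ (by omega)]
    simp only [bChars]
    rw [if_neg (by rw [← hfind]; exact hpos), ← hfind]

-- ===== VERDICT (by name: the statement is the Claim_ definition above) =====
theorem get_before_context_spec : Claim_equal_get_before_context := by
  intro chunk_code _
  unfold Spec_get_before_context
  exact final chunk_code
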